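-- pv_equiv track=rewrite | github.com/durapensa/ksi | ksi_common/type_utils.py | normalize_type_string
-- ===== SOURCE A (Python) =====
-- def normalize_type_string(type_str: str) -> str:
--     """Normalize type string for consistent display."""
--     # Common normalizations
--     normalizations = {
--         "typing.List": "list",
--         "typing.Dict": "dict",
--         "typing.Union": "Union",
--         "typing.Optional": "Optional",
--         "typing.Any": "Any",
--         "builtins.str": "str",
--         "builtins.int": "int",
--         "builtins.float": "float",
--         "builtins.bool": "bool",
--     }
--
--     for old, new in normalizations.items():
--         type_str = type_str.replace(old, new)
--
--     return type_str
-- ===== SOURCE B (Python) =====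
-- def normalize_type_string(type_str: str) -> str:
--     """Normalize type string for consistent display."""
--     table = (
--         ("typing.List", "list"),
--         ("typing.Dict", "dict"),
--         ("typing.Union", "Union"),
--         ("typing.Optional", "Optional"),
--         ("typing.Any", "Any"),
--         ("builtins.str", "str"),
--         ("builtins.int", "int"),
--         ("builtins.float", "float"),
--         ("builtins.bool", "bool"),
--     )
--     pieces = []
--     i = 0
--     n = len(type_str)
--     while i < n:
--         for old, new in table:
--             if type_str.startswith(old, i):
--                 pieces.append(new)
--                 i += len(old)
--                 break
--         else:
--             pieces.append(type_str[i])
--             i += 1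
--     return "".join(pieces)
-- ===== Notes on version B (the rewrite author's own statement) =====
-- stated objective: alternative
-- what changed: B replaces A's nine sequential full-string str.replace passes by one left-to-right scan that, at each position, consults the normalization table and emits either a replacement or the current character; Pre_ excludes strings containing one of 20 literal patterns where an occurrence of one mapping key overlaps or abuts another (e.g. 'typing.Dictyping.List'), on which A's pass order and B's scan order pick different occurrences and either result is defensible.
-- outside the precondition, e.g. on normalize_type_string('typing.Dictyping.List'): A returns 'typing.Diclist', B returns 'dictyping.List'; on normalize_type_string('typing.Optionatyping.List'): A returns 'Optionalist', B returns 'typing.Optionalist'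
import Mathlib
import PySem

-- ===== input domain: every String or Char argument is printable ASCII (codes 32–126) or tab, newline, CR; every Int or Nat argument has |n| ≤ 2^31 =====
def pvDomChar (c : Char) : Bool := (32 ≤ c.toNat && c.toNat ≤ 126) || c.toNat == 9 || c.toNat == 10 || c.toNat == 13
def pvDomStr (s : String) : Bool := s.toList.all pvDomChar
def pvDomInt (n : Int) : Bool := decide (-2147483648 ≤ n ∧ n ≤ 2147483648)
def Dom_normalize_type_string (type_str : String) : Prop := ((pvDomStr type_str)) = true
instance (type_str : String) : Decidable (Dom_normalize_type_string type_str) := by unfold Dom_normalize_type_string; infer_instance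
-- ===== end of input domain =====

-- B replaces A's nine sequential full-string replace passes by one left-to-right scan
-- that consults the normalization table at each position.  Pre_ excludes strings
-- containing one of 20 literal patterns where one mapping key's occurrence overlaps or
-- abuts another (e.g. "typing.Dictyping.List"); there A's pass order and B's scan order
-- pick different occurrences and either result is defensible.

-- ===== PORT A =====
def normalize_type_string (type_str : String) : String :=
  let normalizations : List (String × String) :=
    [("typing.List", "list"),
     ("typing.Dict", "dict"),
     ("typing.Union", "Union"),
     ("typing.Optional", "Optional"),
     ("typing.Any", "Any"),
     ("builtins.str", "str"),
     ("builtins.int", "int"),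
     ("builtins.float", "float"),
     ("builtins.bool", "bool")]
  normalizations.foldl (fun s p => PySem.Str.replace s p.1 p.2) type_str

-- ===== PORT B =====
-- the while loop of Source B: at each position try the table keys in order
-- (dict iteration order); on a match emit the value and jump over the key,
-- otherwise emit the character and move one position on.
def pvScan (T : List (List Char × List Char)) : List Char → List Char
  | [] => []
  | c :: t =>
    match T.find? (fun e => e.1.isPrefixOf (c :: t)) with
    | some e => e.2 ++ pvScan T (List.drop (e.1.length - 1) t)
    | none => c :: pvScan T t
termination_by s => s.length
decreasing_by all_goals (simp [List.length_drop]; try omega)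

-- Source B's normalizations table, on code points
def pvTbl : List (List Char × List Char) :=
  [("typing.List".toList, "list".toList),
   ("typing.Dict".toList, "dict".toList),
   ("typing.Union".toList, "Union".toList),
   ("typing.Optional".toList, "Optional".toList),
   ("typing.Any".toList, "Any".toList),
   ("builtins.str".toList, "str".toList),
   ("builtins.int".toList, "int".toList),
   ("builtins.float".toList, "float".toList),
   ("builtins.bool".toList, "bool".toList)]

def normalize_type_string_alt (type_str : String) : String :=
  String.ofList (pvScan pvTbl type_str.toList)

-- ===== PRECONDITION & SPEC =====
-- Pre_ excludes exactly the strings containing one of these 20 patterns, each the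
-- overlap/abutment of two normalization keys; on them A's nine sequential passes and
-- B's single scan consume different key occurrences and both results are defensible.
def pvBadStr : List String :=
  ["typing.Dictyping.List", "builtins.intyping.List", "builtins.floatyping.List",
   "typing.Listyping.Dict", "typing.Listyping.Union", "typing.Listyping.Optional",
   "typing.Listyping.Any", "typing.Optionatyping.List", "builtins.bootyping.List",
   "builtins.intyping.Dict", "builtins.floatyping.Dict",
   "typing.Dictyping.Union", "typing.Dictyping.Optional", "typing.Dictyping.Any",
   "builtins.intyping.Union", "builtins.floatyping.Union",
   "builtins.intyping.Optional", "builtins.floatyping.Optional",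
   "builtins.intyping.Any", "builtins.floatyping.Any"]

def Pre_normalize_type_string (type_str : String) : Prop :=
  ∀ p ∈ pvBadStr, ¬ (p.toList <:+: type_str.toList)
instance (type_str : String) : Decidable (Pre_normalize_type_string type_str) := by
  unfold Pre_normalize_type_string; infer_instance

def pvWitness_normalize_type_string : String := "typing.Dict[str, typing.Optional[builtins.int]]"

def Spec_normalize_type_string (type_str : String) (out : String) : Prop := out = normalize_type_string_alt type_str
instance (type_str : String) (out : String) : Decidable (Spec_normalize_type_string type_str out) := by unfold Spec_normalize_type_string; infer_instance

-- ===== CLAIM (what is proved, stated in full; the proofs are below) =====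
def Claim_equal_normalize_type_string : Prop := ∀ (type_str : String), Dom_normalize_type_string type_str → Pre_normalize_type_string type_str → Spec_normalize_type_string type_str (normalize_type_string type_str)

-- ===== LEMMAS AND PROOFS =====

-- sequential replace of one key, the recursion str.replace performs
def pvRep (k v : List Char) : List Char → List Char
  | [] => []
  | c :: t =>
    if k.isPrefixOf (c :: t) then v ++ pvRep k v (List.drop (k.length - 1) t)
    else c :: pvRep k v t
termination_by s => s.length
decreasing_by all_goals (simp [List.length_drop]; try omega)


theorem pvScan_nil (T : List (List Char × List Char)) : pvScan T [] = [] := by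
  simp [pvScan]

theorem pvScan_cons_none {T : List (List Char × List Char)} {c : Char} {t : List Char}
    (h : T.find? (fun e => e.1.isPrefixOf (c :: t)) = none) :
    pvScan T (c :: t) = c :: pvScan T t := by
  rw [pvScan.eq_def]; dsimp only; rw [h]

theorem pvScan_cons_some {T : List (List Char × List Char)} {c : Char} {t : List Char}
    {e : List Char × List Char}
    (h : T.find? (fun e => e.1.isPrefixOf (c :: t)) = some e) :
    pvScan T (c :: t) = e.2 ++ pvScan T (List.drop (e.1.length - 1) t) := by
  rw [pvScan.eq_def]; dsimp only; rw [h]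

theorem pvRep_nil (k v : List Char) : pvRep k v [] = [] := by simp [pvRep]

theorem pvRep_neg {k : List Char} (v : List Char) {c : Char} {t : List Char}
    (h : ¬ k <+: (c :: t)) :
    pvRep k v (c :: t) = c :: pvRep k v t := by
  rw [pvRep.eq_def]; dsimp only
  rw [if_neg (by simpa [List.isPrefixOf_iff_prefix] using h)]

theorem pvRep_pos {k : List Char} (v : List Char) {s : List Char}
    (hk : k ≠ []) (h : k <+: s) (hs : s ≠ []) :
    pvRep k v s = v ++ pvRep k v (s.drop k.length) := by
  cases s with
  | nil => exact absurd rfl hs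
  | cons c t =>
    rw [pvRep.eq_def]; dsimp only
    rw [if_pos (by simpa [List.isPrefixOf_iff_prefix] using h)]
    cases hkk : k.length with
    | zero => exact absurd (List.eq_nil_of_length_eq_zero hkk) hk
    | succ m => simp [List.drop_succ_cons]

theorem pvPrefixSplit {a b c : List Char} (h : a <+: b ++ c) : a <+: b ∨ b <+: a :=
  List.prefix_or_prefix_of_prefix h (List.prefix_append b c)

theorem pvInfixAppend {c A B : List Char} (h : c <:+: A ++ B) :
    (∃ j, j < A.length ∧ c <+: (A.drop j ++ B)) ∨ c <:+: B := by
  induction A with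
  | nil => exact Or.inr h
  | cons a A ih =>
    rcases (List.infix_cons_iff).mp h with hp | hi
    · exact Or.inl ⟨0, by simp, hp⟩
    · rcases ih hi with ⟨j, hj, hp⟩ | hB
      · exact Or.inl ⟨j + 1, by simpa using Nat.succ_lt_succ hj, hp⟩
      · exact Or.inr hB


theorem pvRepPrefixN {k v : List Char} (hk : k ≠ []) :
    ∀ n, ∀ s c : List Char, s.length ≤ n → c <+: pvRep k v s →
      c <+: s ∨ ∃ q, q < c.length ∧ c.take q <+: s ∧ k <+: s.drop q ∧
        (c.drop q) <+: (v ++ pvRep k v (s.drop (q + k.length))) := by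
  intro n
  induction n with
  | zero =>
    intro s c hs h
    have : s = [] := List.eq_nil_of_length_eq_zero (Nat.le_zero.mp hs)
    subst this
    rw [pvRep_nil] at h
    exact Or.inl (List.prefix_nil.mp h ▸ List.nil_prefix)
  | succ n ih =>
    intro s c hs h
    cases s with
    | nil =>
      rw [pvRep_nil] at h
      exact Or.inl (List.prefix_nil.mp h ▸ List.nil_prefix)
    | cons c0 t =>
      by_cases hp : k <+: (c0 :: t)
      · rw [pvRep_pos v hk hp (by simp)] at h
        rcases List.eq_nil_or_concat' c with rfl | _
        · exact Or.inl List.nil_prefix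
        · refine Or.inr ⟨0, by simp [List.length_pos_iff]; rintro rfl; simp at *, ?_, ?_, ?_⟩
          · simp
          · simpa using hp
          · simpa using h
      · rw [pvRep_neg v hp] at h
        cases c with
        | nil => exact Or.inl List.nil_prefix
        | cons c1 ct =>
          rw [List.cons_prefix_cons] at h
          obtain ⟨rfl, h⟩ := h
          rcases ih t ct (by simpa using Nat.le_of_succ_le_succ hs) h with h1 | ⟨q, hq, htake, hkp, hdrop⟩
          · exact Or.inl (List.cons_prefix_cons.mpr ⟨rfl, h1⟩)
          · refine Or.inr ⟨q + 1, by simpa using Nat.succ_lt_succ hq, ?_, ?_, ?_⟩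
            · rw [List.take_succ_cons]; exact List.cons_prefix_cons.mpr ⟨rfl, htake⟩
            · simpa [List.drop_succ_cons] using hkp
            · simpa [List.drop_succ_cons, Nat.succ_add] using hdrop

theorem pvRepPrefix {k v : List Char} (hk : k ≠ []) {s c : List Char} (h : c <+: pvRep k v s) :
    c <+: s ∨ ∃ q, q < c.length ∧ c.take q <+: s ∧ k <+: s.drop q ∧
      (c.drop q) <+: (v ++ pvRep k v (s.drop (q + k.length))) :=
  pvRepPrefixN hk s.length s c le_rfl h

theorem pvRepInfixN {k v : List Char} (hk : k ≠ []) :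
    ∀ n, ∀ s c : List Char, s.length ≤ n → c <:+: pvRep k v s →
      c <:+: s ∨
      (∃ x y r, c = x ++ y ∧ y ≠ [] ∧ (x ++ k ++ r) <:+: s ∧ y <+: (v ++ pvRep k v r)) ∨
      (∃ j r, 0 < j ∧ j < v.length ∧ (k ++ r) <:+: s ∧ c <+: (v.drop j ++ pvRep k v r)) := by
  intro n
  induction n with
  | zero =>
    intro s c hs h
    have : s = [] := List.eq_nil_of_length_eq_zero (Nat.le_zero.mp hs)
    subst this
    rw [pvRep_nil] at h
    exact Or.inl (List.eq_nil_of_infix_nil h ▸ List.nil_infix)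
  | succ n ih =>
    intro s c hs h
    cases s with
    | nil =>
      rw [pvRep_nil] at h
      exact Or.inl (List.eq_nil_of_infix_nil h ▸ List.nil_infix)
    | cons c0 t =>
      by_cases hp : k <+: (c0 :: t)
      · obtain ⟨r, hr⟩ := hp
        rw [pvRep_pos v hk ⟨r, hr⟩ (by simp)] at h
        rw [← hr, List.drop_left] at h
        rcases pvInfixAppend h with ⟨j, hj, hcp⟩ | hR
        · rcases Nat.eq_zero_or_pos j with rfl | hj0
          · rcases List.eq_nil_or_concat' c with rfl | hcc
            · exact Or.inl List.nil_infix
            · refine Or.inr (Or.inl ⟨[], c, r, by simp,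
                by rcases hcc with ⟨L, b, rfl⟩; simp, ?_, by simpa using hcp⟩)
              rw [← hr]; simp
          · exact Or.inr (Or.inr ⟨j, r, hj0, hj, by rw [← hr], hcp⟩)
        · have hrs : r.length ≤ n := by
            have := congrArg List.length hr
            simp [List.length_append] at this
            have hk1 : 0 < k.length := List.length_pos_iff.mpr hk
            simp at hs; omega
          rcases ih r c hrs hR with h1 | ⟨x, y, r', hc, hy, hinf, hpre⟩ | ⟨j, r', hj0, hj, hinf, hpre⟩
          · exact Or.inl (h1.trans (by rw [← hr]; exact (List.suffix_append k r).isInfix))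
          · exact Or.inr (Or.inl ⟨x, y, r', hc, hy,
              hinf.trans (by rw [← hr]; exact (List.suffix_append k r).isInfix), hpre⟩)
          · exact Or.inr (Or.inr ⟨j, r', hj0, hj,
              hinf.trans (by rw [← hr]; exact (List.suffix_append k r).isInfix), hpre⟩)
      · rw [pvRep_neg v hp] at h
        rcases List.infix_cons_iff.mp h with hpre | hinf
        · cases c with
          | nil => exact Or.inl List.nil_infix
          | cons c1 ct =>
            rw [List.cons_prefix_cons] at hpre
            obtain ⟨rfl, hpre⟩ := hpre
            rcases pvRepPrefix hk hpre with h1 | ⟨q, hq, htake, hkp, hdrop⟩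
            · exact Or.inl (List.cons_prefix_cons.mpr ⟨rfl, h1⟩).isInfix
            · refine Or.inr (Or.inl ⟨c1 :: ct.take q, ct.drop q, t.drop (q + k.length),
                by simp, by simpa [← List.length_pos_iff, List.length_drop] using hq, ?_, hdrop⟩)
              -- (c1 :: ct.take q) ++ k ++ t.drop (q + k.length) is s itself
              have hlen : (ct.take q).length = q := by
                rw [List.length_take]; exact min_eq_left (Nat.le_of_lt hq)
              have ht : t.take q = ct.take q := by
                have := (List.prefix_iff_eq_take).mp htake
                rw [hlen] at this; exact this.symm
              obtain ⟨w, hw⟩ := hkp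
              have : t = ct.take q ++ (k ++ t.drop (q + k.length)) := by
                conv_lhs => rw [← List.take_append_drop q t, ht, ← hw]
                have : w = t.drop (q + k.length) := by
                  have := congrArg (List.drop k.length) hw
                  rw [List.drop_left] at this
                  rw [this, List.drop_drop, Nat.add_comm]
                rw [this]
              show (c1 :: ct.take q) ++ k ++ t.drop (q + k.length) <:+: c1 :: t
              have h2 : (c1 :: ct.take q) ++ k ++ t.drop (q + k.length)
                  = c1 :: (ct.take q ++ (k ++ t.drop (q + k.length))) := by
                simp [List.append_assoc]
              rw [h2, ← this]
        · rcases ih t c (by simpa using Nat.le_of_succ_le_succ hs) hinf with h1 | ⟨x, y, r', hc, hy, hinf2, hpre⟩ | ⟨j, r', hj0, hj, hinf2, hpre⟩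
          · exact Or.inl (h1.trans (List.suffix_cons c0 t).isInfix)
          · exact Or.inr (Or.inl ⟨x, y, r', hc, hy, hinf2.trans (List.suffix_cons c0 t).isInfix, hpre⟩)
          · exact Or.inr (Or.inr ⟨j, r', hj0, hj, hinf2.trans (List.suffix_cons c0 t).isInfix, hpre⟩)


theorem pvRepInfix {k v : List Char} (hk : k ≠ []) {s c : List Char} (h : c <:+: pvRep k v s) :
    c <:+: s ∨
    (∃ x y r, c = x ++ y ∧ y ≠ [] ∧ (x ++ k ++ r) <:+: s ∧ y <+: (v ++ pvRep k v r)) ∨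
    (∃ j r, 0 < j ∧ j < v.length ∧ (k ++ r) <:+: s ∧ c <+: (v.drop j ++ pvRep k v r)) :=
  pvRepInfixN hk s.length s c le_rfl h

theorem pvRepSkip {k : List Char} (v : List Char) (hk : k ≠ []) :
    ∀ (P X : List Char), (∀ j, j < P.length → ¬ k <+: (P ++ X).drop j) →
      pvRep k v (P ++ X) = P ++ pvRep k v X := by
  intro P
  induction P with
  | nil => intro X _; simp
  | cons p P ih =>
    intro X h
    have h0 : ¬ k <+: (p :: (P ++ X)) := by simpa using h 0 (by simp)
    rw [List.cons_append, pvRep_neg v h0, ih X (fun j hj => by simpa using h (j+1) (by simpa using Nat.succ_lt_succ hj))]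
    simp

theorem pvScanNilTable : ∀ s : List Char, pvScan [] s = s := by
  intro s
  induction s with
  | nil => simp [pvScan_nil]
  | cons c t ih => rw [pvScan_cons_none (by simp), ih]

theorem pvScanSkip (T : List (List Char × List Char)) :
    ∀ (P X : List Char),
      (∀ j, j < P.length → ∀ e ∈ T, ¬ e.1 <+: (P ++ X).drop j) →
      pvScan T (P ++ X) = P ++ pvScan T X := by
  intro P
  induction P with
  | nil => intro X _; simp
  | cons p P ih =>
    intro X h
    have h0 : T.find? (fun e => e.1.isPrefixOf (p :: (P ++ X))) = none := by
      rw [List.find?_eq_none]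
      intro e he
      simpa [List.isPrefixOf_iff_prefix] using h 0 (by simp) e he
    rw [List.cons_append, pvScan_cons_none h0,
      ih X (fun j hj e he => by simpa using h (j+1) (by simpa using Nat.succ_lt_succ hj) e he)]
    simp

theorem pvFindCongr {T : List (List Char × List Char)} {s s' : List Char}
    (h : ∀ e ∈ T, (e.1 <+: s ↔ e.1 <+: s')) :
    T.find? (fun e => e.1.isPrefixOf s) = T.find? (fun e => e.1.isPrefixOf s') := by
  induction T with
  | nil => simp
  | cons e T ih =>
    have hiff := h e (by simp)
    by_cases hp : e.1 <+: s
    · rw [List.find?_cons_of_pos (by simpa [List.isPrefixOf_iff_prefix] using hp),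
        List.find?_cons_of_pos (by simpa [List.isPrefixOf_iff_prefix] using hiff.mp hp)]
    · rw [List.find?_cons_of_neg (by simpa [List.isPrefixOf_iff_prefix] using hp),
        List.find?_cons_of_neg (by simpa [List.isPrefixOf_iff_prefix] using fun hc => hp (hiff.mpr hc))]
      exact ih (fun e' he' => h e' (by simp [he']))

-- Good-string predicate: no bad pattern occurs
def pvGood (Bad : List (List Char)) (s : List Char) : Prop := ∀ Q ∈ Bad, ¬ Q <:+: s

theorem pvGood_mono {Bad : List (List Char)} {s t : List Char} (h : pvGood Bad s)
    (ht : t <:+: s) : pvGood Bad t := fun Q hQ hc => h Q hQ (hc.trans ht)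


theorem pvPrefixGlue {s c k : List Char} {q : Nat} (hq : q ≤ c.length)
    (h1 : c.take q <+: s) (h2 : k <+: s.drop q) : (c.take q ++ k) <+: s := by
  have hlt : (c.take q).length = q := by rw [List.length_take]; omega
  have hqs : q ≤ s.length := by have := h1.length_le; omega
  have hts : s.take q = c.take q := by
    have := (List.prefix_iff_eq_take).mp h1
    rw [hlt] at this; exact this.symm
  conv_rhs => rw [← List.take_append_drop q s, hts]
  exact (List.prefix_append_right_inj _).mpr h2

theorem pvMain (k v : List Char) (T : List (List Char × List Char)) (Bad : List (List Char))
    (hk : k ≠ [])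
    (hTk : ∀ e ∈ T, e.1 ≠ [])
    (hnp2 : ∀ e ∈ T, ∀ e' ∈ T, e.1 ≠ e'.1 → ¬ e.1 <+: e'.1)
    (hlen : ∀ e ∈ T, v.length < e.1.length)
    (hvk : ∀ e ∈ T, ¬ v <+: e.1)
    (hvin : ∀ e ∈ T, ∀ q, q < e.1.length → 0 < q → ¬ v <+: e.1.drop q)
    (hkin : ∀ e ∈ T, ∀ j, j < e.1.length → 0 < j → j + k.length ≤ e.1.length → ¬ k <+: e.1.drop j)
    (hOv : ∀ e ∈ T, ∀ j, j < e.1.length → 0 < j → e.1.drop j <+: k →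
             ∃ Q ∈ Bad, Q <:+: (e.1.take j ++ k))
    (hCr : ∀ e ∈ T, ∀ q, q < e.1.length → 0 < q → e.1.drop q <+: v →
             ∃ Q ∈ Bad, Q <:+: (e.1.take q ++ k))
    (hSp : ∀ e ∈ T, ∀ p, p < v.length → 0 < p → v.drop p <+: e.1 →
             (∃ d, d ≤ k.length ∧ k.drop d = v.drop p ∧ ∃ Q ∈ Bad, Q <:+: (k.take d ++ e.1)) ∧
             (∀ q, q < (e.1.drop (v.length - p)).length →
               (((e.1.drop (v.length - p)).drop q <+: v ∧ (e.1.drop (v.length - p)).drop q ≠ []) ∨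
                 v <+: (e.1.drop (v.length - p)).drop q) →
               ∃ Q ∈ Bad, Q <:+: (k ++ (e.1.drop (v.length - p)).take q ++ k))) :
    ∀ n s, s.length ≤ n → pvGood Bad s →
      pvScan T (pvRep k v s) = pvScan ((k,v)::T) s := by
  intro n
  induction n with
  | zero =>
    intro s hs _
    have : s = [] := List.eq_nil_of_length_eq_zero (Nat.le_zero.mp hs)
    subst this; rw [pvRep_nil, pvScan_nil, pvScan_nil]
  | succ n ih =>
    intro s hs hg
    cases s with
    | nil => rw [pvRep_nil, pvScan_nil, pvScan_nil]
    | cons c0 t =>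
      by_cases hkp : k <+: (c0 :: t)
      · -- CASE B : the head key matches at position 0
        obtain ⟨r, hr⟩ := hkp
        have hkp' : k <+: (c0 :: t) := ⟨r, hr⟩
        rw [pvRep_pos v hk hkp' (by simp)]
        have hdr : (c0 :: t).drop k.length = r := by rw [← hr, List.drop_left]
        rw [hdr]
        have hrlen : r.length ≤ n := by
          have := congrArg List.length hr
          have hk1 : 0 < k.length := List.length_pos_iff.mpr hk
          simp [List.length_append] at this ⊢
          simp at hs; omega
        have hrgood : pvGood Bad r := pvGood_mono hg (by rw [← hr]; exact (List.suffix_append k r).isInfix)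
        -- RHS: the head entry fires
        have hrhs : pvScan ((k,v)::T) (c0 :: t) = v ++ pvScan ((k,v)::T) r := by
          have hfind : ((k,v)::T).find? (fun e => e.1.isPrefixOf (c0 :: t)) = some (k, v) :=
            List.find?_cons_of_pos (by simpa [List.isPrefixOf_iff_prefix] using hkp')
          rw [pvScan_cons_some hfind]
          obtain ⟨m, hm⟩ : ∃ m, k.length = m + 1 := by
            cases hkl : k.length with
            | zero => exact absurd (List.eq_nil_of_length_eq_zero hkl) hk
            | succ m => exact ⟨m, rfl⟩
          have : List.drop ((k,v).1.length - 1) t = r := by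
            have : List.drop k.length (c0 :: t) = r := hdr
            rw [hm, List.drop_succ_cons] at this
            simpa [hm] using this
          rw [this]
        rw [hrhs]
        -- LHS: scanning walks through v without a match
        have hskip : pvScan T (v ++ pvRep k v r) = v ++ pvScan T (pvRep k v r) := by
          apply pvScanSkip
          intro j hj e he hpre
          rw [List.drop_append_of_le_length (Nat.le_of_lt hj)] at hpre
          rcases pvPrefixSplit hpre with h1 | h2
          · have := h1.length_le
            have h3 := hlen e he
            simp [List.length_drop] at this; omega
          · rcases Nat.eq_zero_or_pos j with rfl | hj0
            · simp at h2; exact hvk e he h2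
            · obtain ⟨hsp1, hsp2⟩ := hSp e he j hj hj0 h2
              obtain ⟨c', hc'⟩ := h2
              have hc'eq : c' = e.1.drop (v.length - j) := by
                have := congrArg (List.drop (v.drop j).length) hc'
                rw [List.drop_left] at this
                rw [this, List.length_drop]
              have hc'pre : c' <+: pvRep k v r := by
                rw [← hc'] at hpre
                exact (List.prefix_append_right_inj _).mp hpre
              rcases pvRepPrefix hk hc'pre with hcr | ⟨q, hq, htk, hkq, hdq⟩
              · obtain ⟨d, hd, hkd, Q, hQ, hQin⟩ := hsp1
                refine hg Q hQ (hQin.trans ?_)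
                have heq : k.take d ++ e.1 = k ++ c' := by
                  conv_rhs => rw [← List.take_append_drop d k, hkd, List.append_assoc, hc']
                rw [heq, ← hr]
                exact ((List.prefix_append_right_inj k).mpr hcr).isInfix
              · have hqb : q < (e.1.drop (v.length - j)).length := by
                  rw [← hc'eq]; exact hq
                have hcompat : (((e.1.drop (v.length - j)).drop q <+: v ∧
                    (e.1.drop (v.length - j)).drop q ≠ []) ∨
                    v <+: (e.1.drop (v.length - j)).drop q) := by
                  rw [← hc'eq]
                  rcases pvPrefixSplit hdq with hx | hy
                  · refine Or.inl ⟨hx, ?_⟩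
                    have : 0 < (c'.drop q).length := by rw [List.length_drop]; omega
                    exact List.length_pos_iff.mp this
                  · exact Or.inr hy
                obtain ⟨Q, hQ, hQin⟩ := hsp2 q hqb hcompat
                refine hg Q hQ (hQin.trans ?_)
                rw [← hc'eq]
                have hglue : (c'.take q ++ k) <+: r := pvPrefixGlue (le_of_lt hq) htk hkq
                rw [← hr]
                have hassoc : k ++ c'.take q ++ k = k ++ (c'.take q ++ k) := by
                  simp [List.append_assoc]
                rw [hassoc]
                exact ((List.prefix_append_right_inj k).mpr hglue).isInfix
        rw [hskip, ih r hrlen hrgood]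
      · cases hfind : T.find? (fun e => e.1.isPrefixOf (c0 :: t)) with
        | some e =>
          -- CASE C : a later key matches at position 0
          have he : e ∈ T := List.mem_of_find?_eq_some hfind
          have hpe : e.1 <+: (c0 :: t) := by
            have := List.find?_some hfind
            simpa [List.isPrefixOf_iff_prefix] using this
          obtain ⟨r', hr'⟩ := hpe
          have hpe' : e.1 <+: (c0 :: t) := ⟨r', hr'⟩
          have hek : e.1 ≠ [] := hTk e he
          have hr'len : r'.length ≤ n := by
            have := congrArg List.length hr'
            have he1 : 0 < e.1.length := List.length_pos_iff.mpr hek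
            simp [List.length_append] at this
            simp at hs; omega
          have hr'good : pvGood Bad r' := pvGood_mono hg (by rw [← hr']; exact (List.suffix_append e.1 r').isInfix)
          -- the replace pass leaves the matched key alone
          have hrepeq : pvRep k v (c0 :: t) = e.1 ++ pvRep k v r' := by
            rw [← hr']
            apply pvRepSkip v hk
            intro j hj hkj
            rcases Nat.eq_zero_or_pos j with rfl | hj0
            · rw [List.drop_zero, hr'] at hkj; exact hkp hkj
            · rw [List.drop_append_of_le_length (Nat.le_of_lt hj)] at hkj
              by_cases hj2 : j + k.length ≤ e.1.length
              · have : k <+: e.1.drop j := by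
                  have hlenk : k.length ≤ (e.1.drop j).length := by
                    simp [List.length_drop]; omega
                  exact (List.isPrefix_append_of_length hlenk).mp hkj
                exact hkin e he j hj hj0 hj2 this
              · rcases pvPrefixSplit hkj with hx | hy
                · have := hx.length_le; simp [List.length_drop] at this; omega
                · obtain ⟨Q, hQ, hQin⟩ := hOv e he j hj hj0 hy
                  refine hg Q hQ (hQin.trans ?_)
                  rw [← hr']
                  have : e.1.take j ++ k <+: e.1.take j ++ (e.1.drop j ++ r') :=
                    (List.prefix_append_right_inj _).mpr hkj
                  rw [← List.append_assoc, List.take_append_drop] at this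
                  exact this.isInfix
          rw [hrepeq]
          -- both scans consume e
          have hcong : T.find? (fun e' => e'.1.isPrefixOf (e.1 ++ pvRep k v r')) = some e := by
            rw [← hfind, ← hr']
            apply pvFindCongr
            intro e' he'
            by_cases hl : e'.1.length ≤ e.1.length
            · rw [List.isPrefix_append_of_length hl, List.isPrefix_append_of_length hl]
            · constructor <;> intro hpp <;> exfalso
              all_goals {
                rcases pvPrefixSplit hpp with hx | hy
                · have := hx.length_le; omega
                · by_cases heq : e.1 = e'.1
                  · rw [heq] at hl; omega
                  · exact hnp2 e he e' he' heq hy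
              }
          have hdropt : List.drop (e.1.length - 1) t = r' := by
            have h1 : List.drop e.1.length (c0 :: t) = r' := by rw [← hr', List.drop_left]
            obtain ⟨m, hm⟩ : ∃ m, e.1.length = m + 1 := by
              cases hkl : e.1.length with
              | zero => exact absurd (List.eq_nil_of_length_eq_zero hkl) hek
              | succ m => exact ⟨m, rfl⟩
            rw [hm, List.drop_succ_cons] at h1
            rw [hm]; simpa using h1
          have hlhs : pvScan T (e.1 ++ pvRep k v r') = e.2 ++ pvScan T (pvRep k v r') := by
            obtain ⟨b, bs, hbs⟩ : ∃ b bs, e.1 = b :: bs := by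
              cases hbe : e.1 with
              | nil => exact absurd hbe hek
              | cons b bs => exact ⟨b, bs, rfl⟩
            rw [hbs, List.cons_append]
            rw [pvScan_cons_some (by rw [← List.cons_append, ← hbs]; exact hcong)]
            have hlen1 : e.1.length - 1 = bs.length := by rw [hbs]; simp
            rw [hlen1, List.drop_left]
          rw [hlhs, ih r' hr'len hr'good]
          have hrhs : pvScan ((k,v)::T) (c0 :: t) = e.2 ++ pvScan ((k,v)::T) r' := by
            rw [pvScan_cons_some (by
              rw [List.find?_cons_of_neg (by simpa [List.isPrefixOf_iff_prefix] using hkp)]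
              exact hfind), hdropt]
          rw [hrhs]
        | none =>
          -- CASE D : no key matches at position 0
          have hrepeq : pvRep k v (c0 :: t) = c0 :: pvRep k v t := pvRep_neg v hkp
          rw [hrepeq]
          have hnone : T.find? (fun e => e.1.isPrefixOf (c0 :: pvRep k v t)) = none := by
            rw [List.find?_eq_none]
            intro e he hb
            have hpre : e.1 <+: pvRep k v (c0 :: t) := by
              rw [hrepeq]; simpa [List.isPrefixOf_iff_prefix] using hb
            rcases pvRepPrefix hk hpre with h1 | ⟨q, hq, htk, hkq, hdq⟩
            · have := List.find?_eq_none.mp hfind e he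
              simp [List.isPrefixOf_iff_prefix] at this
              exact this h1
            · rcases Nat.eq_zero_or_pos q with rfl | hq0
              · simp at hkq; exact hkp hkq
              · rcases pvPrefixSplit hdq with hx | hy
                · obtain ⟨Q, hQ, hQin⟩ := hCr e he q hq hq0 hx
                  exact hg Q hQ (hQin.trans (pvPrefixGlue (by omega) htk hkq).isInfix)
                · exact hvin e he q hq hq0 hy
          rw [pvScan_cons_none hnone]
          have hnone2 : ((k,v)::T).find? (fun e => e.1.isPrefixOf (c0 :: t)) = none := by
            rw [List.find?_cons_of_neg (by simpa [List.isPrefixOf_iff_prefix] using hkp), hfind]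
          rw [pvScan_cons_none hnone2, ih t (by simpa using Nat.le_of_succ_le_succ hs)
            (pvGood_mono hg (List.suffix_cons c0 t).isInfix)]


theorem pvGoodPres (k v : List Char) (Bad Bad' : List (List Char))
    (hk : k ≠ [])
    (hsub : ∀ Q ∈ Bad', Q ∈ Bad)
    (hvinP : ∀ P ∈ Bad', ¬ v <:+: P)
    (hyv : ∀ P ∈ Bad', ∀ i, i < P.length → P.drop i <+: v → ∃ Q ∈ Bad, Q <:+: (P.take i ++ k))
    (hjv : ∀ P ∈ Bad', ∀ j, j < v.length → 0 < j →
        ¬ P <+: v.drop j ∧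
        (v.drop j <+: P →
          (∀ q, q < (P.drop (v.length - j)).length →
            (((P.drop (v.length - j)).drop q <+: v ∧ (P.drop (v.length - j)).drop q ≠ []) ∨
              v <+: (P.drop (v.length - j)).drop q) →
            ∃ Q ∈ Bad, Q <:+: (k ++ (P.drop (v.length - j)).take q ++ k)) ∧
          (∃ Q ∈ Bad, Q <:+: (k ++ P.drop (v.length - j))))) :
    ∀ s, pvGood Bad s → pvGood Bad' (pvRep k v s) := by
  intro s hg P hP hPin
  rcases pvRepInfix hk hPin with h1 | ⟨x, y, r, hxy, hy, hinf, hpre⟩ | ⟨j, r, hj0, hj, hinf, hpre⟩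
  · exact hg P (hsub P hP) h1
  · rcases pvPrefixSplit hpre with hx | hv
    · have hi : x.length < P.length := by
        rw [hxy, List.length_append]
        have : 0 < y.length := List.length_pos_iff.mpr hy
        omega
      have hdrop : P.drop x.length = y := by rw [hxy, List.drop_left]
      have htake : P.take x.length = x := by rw [hxy, List.take_left]
      obtain ⟨Q, hQ, hQin⟩ := hyv P hP x.length hi (by rw [hdrop]; exact hx)
      apply hg Q hQ
      refine hQin.trans ?_
      rw [htake]
      exact ((List.prefix_append (x ++ k) r).isInfix).trans hinf
    · exact hvinP P hP (by
        obtain ⟨y', hy'⟩ := hv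
        exact ⟨x, y', by rw [hxy, ← hy']; simp⟩)
  · obtain ⟨hnotp, himp⟩ := hjv P hP j hj hj0
    rcases pvPrefixSplit hpre with hx | hv
    · exact hnotp hx
    · obtain ⟨hkill, hQex⟩ := himp hv
      obtain ⟨c', hc'⟩ := hv
      have hc'eq : c' = P.drop (v.length - j) := by
        have := congrArg (List.drop (v.drop j).length) hc'
        rw [List.drop_left] at this
        rw [this, List.length_drop]
      have hc'pre : c' <+: pvRep k v r := by
        rw [← hc'] at hpre
        exact (List.prefix_append_right_inj _).mp hpre
      rcases pvRepPrefix hk hc'pre with hcr | ⟨q, hq, htk, hkq, hdq⟩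
      · obtain ⟨Q, hQ, hQin⟩ := hQex
        apply hg Q hQ
        refine hQin.trans ?_
        rw [← hc'eq]
        exact (((List.prefix_append_right_inj k).mpr hcr).isInfix).trans hinf
      · have hqb : q < (P.drop (v.length - j)).length := by rw [← hc'eq]; exact hq
        have hcompat : (((P.drop (v.length - j)).drop q <+: v ∧
            (P.drop (v.length - j)).drop q ≠ []) ∨
            v <+: (P.drop (v.length - j)).drop q) := by
          rw [← hc'eq]
          rcases pvPrefixSplit hdq with ha | hb
          · refine Or.inl ⟨ha, ?_⟩
            have : 0 < (c'.drop q).length := by rw [List.length_drop]; omega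
            exact List.length_pos_iff.mp this
          · exact Or.inr hb
        obtain ⟨Q, hQ, hQin⟩ := hkill q hqb hcompat
        refine hg Q hQ (hQin.trans ?_)
        rw [← hc'eq]
        have hglue : (c'.take q ++ k) <+: r := pvPrefixGlue (le_of_lt hq) htk hkq
        have hassoc : k ++ c'.take q ++ k = k ++ (c'.take q ++ k) := by
          simp [List.append_assoc]
        rw [hassoc]
        exact (((List.prefix_append_right_inj k).mpr hglue).isInfix).trans hinf


theorem pvStep (k v : List Char) (T : List (List Char × List Char)) (Bad Bad' : List (List Char))
    (hk : k ≠ [])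
    (hTk : ∀ e ∈ T, e.1 ≠ [])
    (hnp2 : ∀ e ∈ T, ∀ e' ∈ T, e.1 ≠ e'.1 → ¬ e.1 <+: e'.1)
    (hlen : ∀ e ∈ T, v.length < e.1.length)
    (hvk : ∀ e ∈ T, ¬ v <+: e.1)
    (hvin : ∀ e ∈ T, ∀ q, q < e.1.length → 0 < q → ¬ v <+: e.1.drop q)
    (hkin : ∀ e ∈ T, ∀ j, j < e.1.length → 0 < j → j + k.length ≤ e.1.length → ¬ k <+: e.1.drop j)
    (hOv : ∀ e ∈ T, ∀ j, j < e.1.length → 0 < j → e.1.drop j <+: k →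
             ∃ Q ∈ Bad, Q <:+: (e.1.take j ++ k))
    (hCr : ∀ e ∈ T, ∀ q, q < e.1.length → 0 < q → e.1.drop q <+: v →
             ∃ Q ∈ Bad, Q <:+: (e.1.take q ++ k))
    (hSp : ∀ e ∈ T, ∀ p, p < v.length → 0 < p → v.drop p <+: e.1 →
             (∃ d, d ≤ k.length ∧ k.drop d = v.drop p ∧ ∃ Q ∈ Bad, Q <:+: (k.take d ++ e.1)) ∧
             (∀ q, q < (e.1.drop (v.length - p)).length →
               (((e.1.drop (v.length - p)).drop q <+: v ∧ (e.1.drop (v.length - p)).drop q ≠ []) ∨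
                 v <+: (e.1.drop (v.length - p)).drop q) →
               ∃ Q ∈ Bad, Q <:+: (k ++ (e.1.drop (v.length - p)).take q ++ k)))
    (hsub : ∀ Q ∈ Bad', Q ∈ Bad)
    (hvinP : ∀ P ∈ Bad', ¬ v <:+: P)
    (hyv : ∀ P ∈ Bad', ∀ i, i < P.length → P.drop i <+: v → ∃ Q ∈ Bad, Q <:+: (P.take i ++ k))
    (hjv : ∀ P ∈ Bad', ∀ j, j < v.length → 0 < j →
        ¬ P <+: v.drop j ∧
        (v.drop j <+: P →
          (∀ q, q < (P.drop (v.length - j)).length →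
            (((P.drop (v.length - j)).drop q <+: v ∧ (P.drop (v.length - j)).drop q ≠ []) ∨
              v <+: (P.drop (v.length - j)).drop q) →
            ∃ Q ∈ Bad, Q <:+: (k ++ (P.drop (v.length - j)).take q ++ k)) ∧
          (∃ Q ∈ Bad, Q <:+: (k ++ P.drop (v.length - j)))))
    (ih : ∀ s, pvGood Bad' s → List.foldl (fun cs e => pvRep e.1 e.2 cs) s T = pvScan T s) :
    ∀ s, pvGood Bad s →
      List.foldl (fun cs e => pvRep e.1 e.2 cs) s ((k,v)::T) = pvScan ((k,v)::T) s := by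
  intro s hg
  rw [List.foldl_cons]
  rw [ih (pvRep k v s) (pvGoodPres k v Bad Bad' hk hsub hvinP hyv hjv s hg)]
  exact pvMain k v T Bad hk hTk hnp2 hlen hvk hvin hkin hOv hCr hSp s.length s le_rfl hg

def pvB5 : List (List Char) :=
  ["builtins.intyping.Any".toList, "builtins.floatyping.Any".toList]
def pvB4 : List (List Char) :=
  ["builtins.intyping.Optional".toList, "builtins.floatyping.Optional".toList] ++ pvB5
def pvB3 : List (List Char) :=
  ["builtins.intyping.Union".toList, "builtins.floatyping.Union".toList] ++ pvB4
def pvB2 : List (List Char) :=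
  ["builtins.intyping.Dict".toList, "builtins.floatyping.Dict".toList,
   "typing.Dictyping.Union".toList, "typing.Dictyping.Optional".toList,
   "typing.Dictyping.Any".toList] ++ pvB3
def pvB1 : List (List Char) :=
  ["typing.Dictyping.List".toList, "builtins.intyping.List".toList,
   "builtins.floatyping.List".toList, "typing.Listyping.Dict".toList,
   "typing.Listyping.Union".toList, "typing.Listyping.Optional".toList,
   "typing.Listyping.Any".toList, "typing.Optionatyping.List".toList,
   "builtins.bootyping.List".toList] ++ pvB2

set_option maxHeartbeats 4000000 in
theorem pvChain : ∀ s, pvGood pvB1 s →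
    List.foldl (fun cs e => pvRep e.1 e.2 cs) s pvTbl = pvScan pvTbl s := by
  have h10 : ∀ s, pvGood ([] : List (List Char)) s →
      List.foldl (fun cs e => pvRep e.1 e.2 cs) s ([] : List (List Char × List Char))
        = pvScan [] s := by
    intro s _; rw [List.foldl_nil, pvScanNilTable]
  have h9 := pvStep "builtins.bool".toList "bool".toList [] [] []
    (by decide) (by decide) (by decide) (by decide) (by decide) (by decide) (by decide)
    (by decide) (by decide) (by decide) (by decide) (by decide) (by decide) (by decide) h10
  have h8 := pvStep "builtins.float".toList "float".toList (pvTbl.drop 8) [] []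
    (by decide) (by decide) (by decide) (by decide) (by decide) (by decide) (by decide)
    (by decide) (by decide) (by decide) (by decide) (by decide) (by decide) (by decide) (by exact h9)
  have h7 := pvStep "builtins.int".toList "int".toList (pvTbl.drop 7) [] []
    (by decide) (by decide) (by decide) (by decide) (by decide) (by decide) (by decide)
    (by decide) (by decide) (by decide) (by decide) (by decide) (by decide) (by decide) (by exact h8)
  have h6 := pvStep "builtins.str".toList "str".toList (pvTbl.drop 6) [] []
    (by decide) (by decide) (by decide) (by decide) (by decide) (by decide) (by decide)
    (by decide) (by decide) (by decide) (by decide) (by decide) (by decide) (by decide) (by exact h7)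
  have h5 := pvStep "typing.Any".toList "Any".toList (pvTbl.drop 5) pvB5 []
    (by decide) (by decide) (by decide) (by decide) (by decide) (by decide) (by decide)
    (by decide) (by decide) (by decide) (by decide) (by decide) (by decide) (by decide) (by exact h6)
  have h4 := pvStep "typing.Optional".toList "Optional".toList (pvTbl.drop 4) pvB4 pvB5
    (by decide) (by decide) (by decide) (by decide) (by decide) (by decide) (by decide)
    (by decide) (by decide) (by decide) (by decide) (by decide) (by decide) (by decide) (by exact h5)
  have h3 := pvStep "typing.Union".toList "Union".toList (pvTbl.drop 3) pvB3 pvB4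
    (by decide) (by decide) (by decide) (by decide) (by decide) (by decide) (by decide)
    (by decide) (by decide) (by decide) (by decide) (by decide) (by decide) (by decide) (by exact h4)
  have h2 := pvStep "typing.Dict".toList "dict".toList (pvTbl.drop 2) pvB2 pvB3
    (by decide) (by decide) (by decide) (by decide) (by decide) (by decide) (by decide)
    (by decide) (by decide) (by decide) (by decide) (by decide) (by decide) (by decide) (by exact h3)
  have h1 := pvStep "typing.List".toList "list".toList (pvTbl.drop 1) pvB1 pvB2
    (by decide) (by decide) (by decide) (by decide) (by decide) (by decide) (by decide)
    (by decide) (by decide) (by decide) (by decide) (by decide) (by decide) (by decide) (by exact h2)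
  exact fun s hg => h1 s hg


-- the accumulator of PySem.Chars.replace.go is a reversed prefix of the result
theorem pvReplaceGo_acc (old new : List Char) (fuel : Nat) :
    ∀ (l acc : List Char),
      PySem.Chars.replace.go old new fuel l acc
        = acc.reverse ++ PySem.Chars.replace.go old new fuel l [] := by
  induction fuel with
  | zero => intro l acc; simp [PySem.Chars.replace.go]
  | succ f ih =>
    intro l acc
    cases l with
    | nil => simp [PySem.Chars.replace.go]
    | cons c t =>
      by_cases h : old.isPrefixOf (c :: t) = true
      · simp only [PySem.Chars.replace.go, h, if_true]
        rw [ih _ (new.reverse ++ acc), ih _ (new.reverse ++ [])]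
        simp
      · simp only [PySem.Chars.replace.go, h, Bool.false_eq_true, if_false]
        rw [ih t (c :: acc), ih t (c :: [])]
        simp

theorem pvGoEq {k v : List Char} (hk : k ≠ []) :
    ∀ fuel l, l.length ≤ fuel →
      PySem.Chars.replace.go k v fuel l [] = pvRep k v l := by
  intro fuel
  induction fuel with
  | zero =>
    intro l hl
    have : l = [] := List.eq_nil_of_length_eq_zero (Nat.le_zero.mp hl)
    subst this
    simp [PySem.Chars.replace.go, pvRep_nil]
  | succ f ih =>
    intro l hl
    cases l with
    | nil => simp [PySem.Chars.replace.go, pvRep_nil]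
    | cons c t =>
      have hk1 : 0 < k.length := List.length_pos_iff.mpr hk
      by_cases h : k.isPrefixOf (c :: t) = true
      · simp only [PySem.Chars.replace.go, h, if_true]
        rw [pvReplaceGo_acc]
        rw [ih (List.drop k.length (c :: t)) (by simp [List.length_drop]; simp at hl; omega)]
        rw [pvRep_pos v hk (List.isPrefixOf_iff_prefix.mp h) (by simp)]
        simp
      · simp only [PySem.Chars.replace.go, h, Bool.false_eq_true, if_false]
        rw [pvReplaceGo_acc]
        rw [ih t (by simpa using Nat.le_of_succ_le_succ hl)]
        rw [pvRep_neg v (fun hc => h (List.isPrefixOf_iff_prefix.mpr hc))]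
        simp

theorem pvCharsReplaceEq (s k v : List Char) (hk : k ≠ []) :
    PySem.Chars.replace s k v = pvRep k v s := by
  rw [PySem.Chars.replace]
  rw [if_neg (by simp [List.isEmpty_iff, hk])]
  exact pvGoEq hk s.length s le_rfl

theorem pvFoldBridge :
    ∀ (L : List (String × String)) (s : String), (∀ e ∈ L, e.1.toList ≠ []) →
      (List.foldl (fun s p => PySem.Str.replace s p.1 p.2) s L).toList
        = List.foldl (fun cs e => pvRep e.1 e.2 cs) s.toList
            (L.map (fun e => (e.1.toList, e.2.toList))) := by
  intro L
  induction L with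
  | nil => intro s _; simp
  | cons e L ih =>
    intro s h
    simp only [List.foldl_cons, List.map_cons]
    rw [ih (PySem.Str.replace s e.1 e.2) (fun e' he' => h e' (List.mem_cons_of_mem e he'))]
    have hrep : (PySem.Str.replace s e.1 e.2).toList
        = pvRep e.1.toList e.2.toList s.toList := by
      rw [PySem.Str.replace, String.toList_ofList]
      exact pvCharsReplaceEq _ _ _ (h e List.mem_cons_self)
    rw [hrep]

theorem pvPortAList (ts : String) :
    (normalize_type_string ts).toList
      = List.foldl (fun cs e => pvRep e.1 e.2 cs) ts.toList pvTbl := by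
  simp only [normalize_type_string]
  rw [pvFoldBridge _ ts (by decide)]
  congr 1

theorem pvPreGood (ts : String) (h : Pre_normalize_type_string ts) :
    pvGood pvB1 ts.toList := by
  intro Q hQ
  simp only [pvB1, pvB2, pvB3, pvB4, pvB5, List.cons_append, List.nil_append,
    List.mem_cons, List.not_mem_nil, or_false] at hQ
  rcases hQ with rfl|rfl|rfl|rfl|rfl|rfl|rfl|rfl|rfl|rfl|rfl|rfl|rfl|rfl|rfl|rfl|rfl|rfl|rfl|rfl <;>
    exact h _ (by simp [pvBadStr])

-- ===== VERDICT (by name: the statement is the Claim_ definition above) =====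
theorem normalize_type_string_spec : Claim_equal_normalize_type_string := by
  intro ts _ hpre
  show normalize_type_string ts = normalize_type_string_alt ts
  apply String.toList_inj.mp
  rw [pvPortAList, pvChain ts.toList (pvPreGood ts hpre)]
  simp only [normalize_type_string_alt, String.toList_ofList]
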